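-- pv_equiv track=rewrite | github.com/abal6725/GCP | GCP.py | strip_all_entities
-- ===== SOURCE A (Python) =====
-- def strip_all_entities(text):
--     import string
--     entity_prefixes = ['@','#', "'"]
--     for separator in  string.punctuation:
--         if separator not in entity_prefixes:
--             text = text.replace(separator,' ')
--     words = []
--     for word in text.split():
--         word = word.strip()
--         if word:
--             if word[0] not in entity_prefixes:
--                 words.append(word)
--     return ' '.join(words)
-- ===== SOURCE B (Python) =====
-- def strip_all_entities(text):
--     import string
--     entity_prefixes = ('@', '#', "'")
--     delims = set(string.punctuation) - set(entity_prefixes)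
--     words = []
--     cur = []
--     for ch in text:
--         if ch.isspace() or ch in delims:
--             if cur and cur[0] not in entity_prefixes:
--                 words.append(''.join(cur))
--             cur = []
--         else:
--             cur.append(ch)
--     if cur and cur[0] not in entity_prefixes:
--         words.append(''.join(cur))
--     return ' '.join(words)
-- ===== Notes on version B (the rewrite author's own statement) =====
-- stated objective: alternative
-- what changed: Replaced A's 29 whole-string replace() passes followed by split/strip/filter with a single-pass character tokenizer over a precomputed delimiter set that filters entity-prefixed tokens as it closes them.
import Mathlib
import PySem

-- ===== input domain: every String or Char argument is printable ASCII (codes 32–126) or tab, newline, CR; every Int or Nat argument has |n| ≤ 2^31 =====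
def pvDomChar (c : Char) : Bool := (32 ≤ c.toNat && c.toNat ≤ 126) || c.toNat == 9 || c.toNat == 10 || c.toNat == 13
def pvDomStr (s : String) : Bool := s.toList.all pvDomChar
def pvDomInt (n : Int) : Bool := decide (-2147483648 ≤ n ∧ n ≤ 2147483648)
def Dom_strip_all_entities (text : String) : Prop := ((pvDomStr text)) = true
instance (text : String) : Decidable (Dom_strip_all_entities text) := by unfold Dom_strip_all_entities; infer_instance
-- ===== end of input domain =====

-- B replaces A's 29 whole-string replace passes + split + strip + filter by one single-pass
-- tokenizer over an explicit delimiter set (same return value; different decomposition).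

-- ===== PORT A =====
-- string.punctuation, in CPython's order
def pvPunct : List Char :=
  ['!','"','#','$','%','&','\'','(',')','*','+',',','-','.','/',':',';','<','=','>','?','@','[','\\',']','^','_','`','{','|','}','~']
def pvEntityPrefixes : List Char := ['@', '#', '\'']

def stripAllCoreA (cs : List Char) : List Char :=
  -- for separator in string.punctuation: if separator not in entity_prefixes: text = text.replace(separator, ' ')
  let t := pvPunct.foldl (fun t sep =>
    if ¬ (sep ∈ pvEntityPrefixes) then PySem.Chars.replace t [sep] [' '] else t) cs
  -- for word in text.split(): word = word.strip(); if word: if word[0] not in entity_prefixes: words.append(word)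
  let words := (PySem.Chars.split₀ t).foldl (fun ws w =>
    let w := PySem.Chars.strip w
    if ¬ w.isEmpty then
      (if ¬ (w.headD ' ' ∈ pvEntityPrefixes) then ws ++ [w] else ws)  -- word[0]: guarded by nonemptiness
    else ws) []
  PySem.Chars.join [' '] words

def strip_all_entities (text : String) : String := String.ofList (stripAllCoreA text.toList)

-- ===== PORT B =====
def pvEprefB : List Char := ['@', '#', '\'']
-- delims = set(string.punctuation) - set(entity_prefixes)
def pvDelimsB : PySem.Set Char :=
  PySem.Set.diff (PySem.Set.ofList
    ['!','"','#','$','%','&','\'','(',')','*','+',',','-','.','/',':',';','<','=','>','?','@','[','\\',']','^','_','`','{','|','}','~'])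
    pvEprefB

def stripAllCoreB (cs : List Char) : List Char :=
  -- single pass: state = (cur, words)
  let st := cs.foldl (fun (s : List Char × List (List Char)) ch =>
    if PySem.Chars.isspace ch || PySem.Set.contains pvDelimsB ch then
      (([] : List Char),
       if ¬ s.1.isEmpty ∧ ¬ (s.1.headD ' ' ∈ pvEprefB) then s.2 ++ [s.1] else s.2)
    else (s.1 ++ [ch], s.2)) (([] : List Char), ([] : List (List Char)))
  -- final flush
  let words := if ¬ st.1.isEmpty ∧ ¬ (st.1.headD ' ' ∈ pvEprefB) then st.2 ++ [st.1] else st.2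
  PySem.Chars.join [' '] words

def strip_all_entities_alt (text : String) : String := String.ofList (stripAllCoreB text.toList)

-- ===== PRECONDITION & SPEC =====
def Spec_strip_all_entities (text : String) (out : String) : Prop := out = strip_all_entities_alt text
instance (text : String) (out : String) : Decidable (Spec_strip_all_entities text out) := by unfold Spec_strip_all_entities; infer_instance

-- ===== CLAIM (what is proved, stated in full; the proofs are below) =====
def Claim_equal_strip_all_entities : Prop := ∀ (text : String), Dom_strip_all_entities text → Spec_strip_all_entities text (strip_all_entities text)

-- ===== LEMMAS AND PROOFS =====
def pvDelimList : List Char := pvPunct.filter (fun s => decide (¬ s ∈ pvEntityPrefixes))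
def pvSubst (x : Char) : Char := if x ∈ pvDelimList then ' ' else x
def pvDelimTest (c : Char) : Bool := PySem.Chars.isspace c || decide (c ∈ pvDelimList)
def pvGood (w : List Char) : Bool := decide (¬ w.isEmpty ∧ ¬ (w.headD ' ' ∈ pvEntityPrefixes))

-- the single step of B's loop and its final flush, as named functions
def pvBStep (s : List Char × List (List Char)) (ch : Char) : List Char × List (List Char) :=
  if PySem.Chars.isspace ch || PySem.Set.contains pvDelimsB ch then
    (([] : List Char),
     if ¬ s.1.isEmpty ∧ ¬ (s.1.headD ' ' ∈ pvEprefB) then s.2 ++ [s.1] else s.2)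
  else (s.1 ++ [ch], s.2)
def pvFlush (st : List Char × List (List Char)) : List (List Char) :=
  if ¬ st.1.isEmpty ∧ ¬ (st.1.headD ' ' ∈ pvEprefB) then st.2 ++ [st.1] else st.2

-- reference tokenizer both ports are reduced to
def pvTok : List Char → List Char → List (List Char)
  | [], cur => if cur.isEmpty then [] else [cur]
  | c :: t, cur =>
      if pvDelimTest c then
        (if cur.isEmpty then pvTok t [] else cur :: pvTok t [])
      else pvTok t (cur ++ [c])

theorem pv_replace_go (c : Char) (l : List Char) :
    ∀ (fuel : Nat) (acc : List Char), l.length ≤ fuel →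
      PySem.Chars.replace.go [c] [' '] fuel l acc
        = acc.reverse ++ l.map (fun x => if x = c then ' ' else x) := by
  induction l with
  | nil =>
      intro fuel acc _
      cases fuel <;> simp [PySem.Chars.replace.go]
  | cons a t ih =>
      intro fuel acc h
      cases fuel with
      | zero => simp at h
      | succ n =>
        have ht : t.length ≤ n := by simp only [List.length_cons] at h; omega
        simp only [PySem.Chars.replace.go, List.isPrefixOf]
        by_cases hac : a = c
        · subst hac
          simp only [BEq.rfl, Bool.and_true, if_true, List.length_cons,
            List.length_nil, Nat.zero_add, List.drop_succ_cons, List.drop_zero,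
            List.reverse_cons, List.reverse_nil, List.nil_append]
          rw [ih n ([' '] ++ acc) ht]
          simp
        · have hba : (c == a) = false := beq_eq_false_iff_ne.mpr (Ne.symm hac)
          simp only [hba, Bool.false_and, Bool.false_eq_true, if_false]
          rw [ih n (a :: acc) ht]
          simp [hac]

theorem pv_replace_single (c : Char) (l : List Char) :
    PySem.Chars.replace l [c] [' '] = l.map (fun x => if x = c then ' ' else x) := by
  simpa [PySem.Chars.replace] using pv_replace_go c l l.length [] (le_refl _)

theorem pv_fold_replace (ss : List Char) (cs : List Char) :
    ss.foldl (fun t sep => PySem.Chars.replace t [sep] [' ']) cs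
      = cs.map (fun x => ss.foldl (fun y sep => if y = sep then ' ' else y) x) := by
  induction ss generalizing cs with
  | nil => simp
  | cons a ss ih =>
      simp only [List.foldl_cons]
      rw [pv_replace_single, ih, List.map_map]
      rfl

theorem pv_char_fold (ss : List Char) (h : ' ' ∉ ss) (x : Char) :
    ss.foldl (fun y sep => if y = sep then ' ' else y) x = if x ∈ ss then ' ' else x := by
  induction ss generalizing x with
  | nil => simp
  | cons a ss ih =>
      have hs : ' ' ∉ ss := fun hm => h (List.mem_cons_of_mem _ hm)
      simp only [List.foldl_cons]
      by_cases hx : x = a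
      · subst hx
        rw [if_pos rfl, ih hs ' ']
        simp [hs]
      · rw [if_neg hx, ih hs x]
        simp [List.mem_cons, hx]

theorem pv_A_replaced (cs : List Char) :
    pvPunct.foldl (fun t sep =>
        if ¬ (sep ∈ pvEntityPrefixes) then PySem.Chars.replace t [sep] [' '] else t) cs
      = cs.map pvSubst := by
  rw [PySem.List.foldl_ite_eq_foldl_filter]
  rw [pv_fold_replace]
  apply List.map_congr_left
  intro x _
  rw [pv_char_fold _ (by decide)]
  rfl

theorem pv_isspace_subst (c : Char) :
    PySem.Chars.isspace (pvSubst c) = pvDelimTest c := by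
  unfold pvSubst pvDelimTest
  by_cases h : c ∈ pvDelimList
  · simp [h]
    decide
  · simp [h]

theorem pv_split_go (l : List Char) :
    ∀ (cur : List Char) (acc : List (List Char)),
      PySem.Chars.split₀.go (l.map pvSubst) cur.reverse acc
        = acc.reverse ++ pvTok l cur := by
  induction l with
  | nil =>
      intro cur acc
      by_cases h : cur.isEmpty <;>
        simp [PySem.Chars.split₀.go, pvTok, h]
  | cons c t ih =>
      intro cur acc
      simp only [List.map_cons, PySem.Chars.split₀.go, pv_isspace_subst, pvTok]
      by_cases hd : pvDelimTest c
      · simp only [hd, if_true]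
        by_cases hc : cur.isEmpty
        · have hnil : cur = [] := by simpa [List.isEmpty_iff] using hc
          subst hnil
          simpa using ih [] acc
        · simp only [List.isEmpty_reverse, hc, Bool.false_eq_true, if_false]
          have h2 := ih [] (cur.reverse.reverse :: acc)
          simp only [List.reverse_nil] at h2
          rw [h2]
          simp
      · have hcd : c ∉ pvDelimList := fun hm => hd (by simp [pvDelimTest, hm])
        have hsub : pvSubst c = c := by simp [pvSubst, hcd]
        simp only [Bool.not_eq_true] at hd
        simp only [hd, Bool.false_eq_true, if_false, hsub]
        have h3 := ih (cur ++ [c]) acc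
        simpa [List.reverse_append] using h3

theorem pv_split_eq (cs : List Char) :
    PySem.Chars.split₀ (cs.map pvSubst) = pvTok cs [] := by
  simpa [PySem.Chars.split₀] using pv_split_go cs [] []

theorem pv_tok_mem (l : List Char) :
    ∀ (cur : List Char), (∀ c ∈ cur, pvDelimTest c = false) →
      ∀ w ∈ pvTok l cur, w ≠ [] ∧ ∀ c ∈ w, pvDelimTest c = false := by
  induction l with
  | nil =>
      intro cur hcur w hw
      by_cases h : cur.isEmpty
      · simp [pvTok, h] at hw
      · simp only [pvTok, h, Bool.false_eq_true, if_false, List.mem_singleton] at hw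
        subst hw
        exact ⟨by simpa [List.isEmpty_iff] using h, hcur⟩
  | cons c t ih =>
      intro cur hcur w hw
      simp only [pvTok] at hw
      by_cases hd : pvDelimTest c
      · rw [if_pos hd] at hw
        by_cases hc : cur.isEmpty
        · rw [if_pos hc] at hw
          exact ih [] (by simp) w hw
        · rw [if_neg (by simp [hc]), List.mem_cons] at hw
          rcases hw with rfl | hw
          · exact ⟨by simpa [List.isEmpty_iff] using hc, hcur⟩
          · exact ih [] (by simp) w hw
      · rw [if_neg hd] at hw
        refine ih (cur ++ [c]) ?_ w hw
        intro x hx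
        rcases List.mem_append.mp hx with hx1 | hx1
        · exact hcur x hx1
        · rw [List.mem_singleton.mp hx1]
          simpa using hd

theorem pv_strip_noop (w : List Char) (h : ∀ c ∈ w, PySem.Chars.isspace c = false) :
    PySem.Chars.strip w = w := by
  have hl : PySem.Chars.lstrip w = w := by
    simp only [PySem.Chars.lstrip]
    refine List.dropWhile_eq_self_iff.mpr ?_
    intro hne
    simp [h _ (List.getElem_mem hne)]
  have hr : PySem.Chars.rstrip w = w := by
    simp only [PySem.Chars.rstrip]
    have hdw : List.dropWhile PySem.Chars.isspace w.reverse = w.reverse := by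
      refine List.dropWhile_eq_self_iff.mpr ?_
      intro hne
      have hlen : 0 < w.length := by simpa using hne
      have hmem : w[w.length - 1]'(by omega) ∈ w := List.getElem_mem _
      simp [h _ hmem]
    rw [hdw, List.reverse_reverse]
  simp [PySem.Chars.strip, hl, hr]

-- A's word loop, over the tokens
theorem pv_A_eq (cs : List Char) :
    stripAllCoreA cs = PySem.Chars.join [' '] ((pvTok cs []).filter pvGood) := by
  simp only [stripAllCoreA]
  rw [pv_A_replaced, pv_split_eq]
  have hmem := pv_tok_mem cs [] (by simp)
  have h1 : (pvTok cs []).foldl (fun ws w =>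
      let w := PySem.Chars.strip w
      if ¬ w.isEmpty then
        (if ¬ (w.headD ' ' ∈ pvEntityPrefixes) then ws ++ [w] else ws)
      else ws) []
    = (pvTok cs []).foldl (fun ws w =>
      if ¬ w.isEmpty ∧ ¬ (w.headD ' ' ∈ pvEntityPrefixes) then ws ++ [w] else ws) [] := by
    apply PySem.List.foldl_congr_mem
    intro acc w hw
    have hs : PySem.Chars.strip w = w := by
      apply pv_strip_noop
      intro c hc
      have hcc := (hmem w hw).2 c hc
      simp only [pvDelimTest, Bool.or_eq_false_iff] at hcc
      exact hcc.1
    simp only [hs]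
    split_ifs <;> first | rfl | tauto
  rw [h1, PySem.List.foldl_append_ite_eq_filter]
  simp only [List.nil_append]
  rfl

-- B's loop plus final flush, over the tokens
theorem pv_B_fold (l : List Char) :
    ∀ (cur : List Char) (ws : List (List Char)),
      pvFlush (l.foldl pvBStep (cur, ws)) = ws ++ (pvTok l cur).filter pvGood := by
  have hset : ∀ c : Char,
      (PySem.Chars.isspace c || PySem.Set.contains pvDelimsB c) = pvDelimTest c := by
    intro c
    have hDB : pvDelimsB = pvDelimList := by decide
    simp [pvDelimTest, hDB, PySem.Set.contains]
  induction l with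
  | nil =>
      intro cur ws
      simp only [List.foldl_nil, pvFlush, pvTok]
      by_cases h : cur.isEmpty
      · have hnil : cur = [] := by simpa [List.isEmpty_iff] using h
        subst hnil
        simp
      · have hne : cur.isEmpty = false := by simpa using h
        simp only [hne, Bool.false_eq_true, if_false]
        by_cases hg : cur.headD ' ' ∈ pvEprefB
        · have hgf : pvGood cur = false := decide_eq_false (fun hp => hp.2 hg)
          rw [if_neg (fun hp => hp.2 hg)]
          simp [hgf]
        · have hgt : pvGood cur = true := decide_eq_true ⟨by simp [hne], hg⟩
          rw [if_pos ⟨not_false, hg⟩]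
          simp [hgt]
  | cons c t ih =>
      intro cur ws
      simp only [List.foldl_cons, pvBStep, hset, pvTok]
      by_cases hd : pvDelimTest c
      · simp only [hd, if_true]
        by_cases h : cur.isEmpty
        · have hnil : cur = [] := by simpa [List.isEmpty_iff] using h
          subst hnil
          rw [if_neg (by simp)]
          simpa using ih [] ws
        · have hne : cur.isEmpty = false := by simpa using h
          simp only [hne, Bool.false_eq_true, if_false]
          by_cases hg : cur.headD ' ' ∈ pvEprefB
          · have hgf : pvGood cur = false := decide_eq_false (fun hp => hp.2 hg)
            rw [if_neg (fun hp => hp.2 hg), ih [] ws]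
            simp [hgf]
          · have hgt : pvGood cur = true := decide_eq_true ⟨by simp [hne], hg⟩
            rw [if_pos ⟨not_false, hg⟩, ih [] (ws ++ [cur])]
            simp [hgt]
      · have hdf : pvDelimTest c = false := by simpa using hd
        simp only [hdf, Bool.false_eq_true, if_false]
        exact ih (cur ++ [c]) ws

theorem pv_B_eq (cs : List Char) :
    stripAllCoreB cs = PySem.Chars.join [' '] ((pvTok cs []).filter pvGood) := by
  show PySem.Chars.join [' '] (pvFlush (cs.foldl pvBStep ([], []))) = _
  rw [pv_B_fold cs [] []]
  simp

-- ===== VERDICT (by name: the statement is the Claim_ definition above) =====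
theorem strip_all_entities_spec : Claim_equal_strip_all_entities := by
  intro text _
  unfold Spec_strip_all_entities strip_all_entities strip_all_entities_alt
  rw [pv_A_eq, pv_B_eq]
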